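-- pv_equiv track=rewrite | github.com/broadinstitute/gnomad_methods | gnomad/utils/transcript_annotation.py | clean_tissue_name_for_browser
-- ===== SOURCE A (Python) =====
-- def clean_tissue_name_for_browser(tissue_name: str) -> str:
--     """
--     Clean and formats a tissue name for browser compatibility.
--
--     This function converts uppercase letters to lowercase and adds underscores
--     between words where necessary. Additionally, it replaces certain combined
--     words with their corresponding formatted versions.
--
--     :param tissue_name: Tissue name to clean and format.
--     :return: Cleaned and formatted tissue name.
--     """
--     formatted_name = ""
--
--     for char in tissue_name:
--         if char.isupper():
--             if len(formatted_name) > 0 and formatted_name[-1] != "_":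
--                 formatted_name += "_"
--             formatted_name += char.lower()
--         else:
--             formatted_name += char
--
--     # Dictionary of tissue names that need to be reformatted that will not be formatted
--     # correctly with for loop above.
--     replacements = {
--         "basalganglia": "basal_ganglia",
--         "nucleusaccumbens": "nucleus_accumbens",
--         "spinalcord": "spinal_cord",
--         "cervicalc": "cervical_c",
--         "substantianigra": "substantia_nigra",
--         "culturedfibroblasts": "cultured_fibroblasts",
--         "lowerleg": "lower_leg",
--         "transformedlymphocytes": "transformed_lymphocytes",
--         "anteriorcingulatecortex": "anterior_cingulate_cortex",
--         "b_a24": "ba24",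
--         "b_a9": "ba9",
--         "e_b_v": "ebv",
--     }
--
--     for original, replacement in replacements.items():
--         formatted_name = formatted_name.replace(original, replacement)
--
--     return formatted_name
-- ===== SOURCE B (Python) =====
-- def clean_tissue_name_for_browser(tissue_name: str) -> str:
--     """Boundary-index formulation: collect every word-break position, slice the
--     string at those positions, lowercase each piece and join the pieces with
--     underscores; the fixups are then applied via split/join instead of
--     str.replace."""
--     cuts = [
--         i
--         for i, char in enumerate(tissue_name)
--         if i > 0 and char.isupper() and tissue_name[i - 1] != "_"
--     ]
--     pieces = [
--         tissue_name[start:stop].lower()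
--         for start, stop in zip([0] + cuts, cuts + [len(tissue_name)])
--     ]
--     name = "_".join(pieces)
--     for old, new in [
--         ("basalganglia", "basal_ganglia"),
--         ("nucleusaccumbens", "nucleus_accumbens"),
--         ("spinalcord", "spinal_cord"),
--         ("cervicalc", "cervical_c"),
--         ("substantianigra", "substantia_nigra"),
--         ("culturedfibroblasts", "cultured_fibroblasts"),
--         ("lowerleg", "lower_leg"),
--         ("transformedlymphocytes", "transformed_lymphocytes"),
--         ("anteriorcingulatecortex", "anterior_cingulate_cortex"),
--         ("b_a24", "ba24"),
--         ("b_a9", "ba9"),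
--         ("e_b_v", "ebv"),
--     ]:
--         name = new.join(name.split(old))
--     return name
-- ===== Notes on version B (the rewrite author's own statement) =====
-- stated objective: alternative
-- what changed: Replaces A's stateful accumulator loop (which inspects the output's last character) by a boundary-index formulation -- collect all word-break positions, slice the string at them, lowercase each piece and join with underscores -- and applies the twelve fixups via new.join(name.split(old)) instead of str.replace.
import Mathlib
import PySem

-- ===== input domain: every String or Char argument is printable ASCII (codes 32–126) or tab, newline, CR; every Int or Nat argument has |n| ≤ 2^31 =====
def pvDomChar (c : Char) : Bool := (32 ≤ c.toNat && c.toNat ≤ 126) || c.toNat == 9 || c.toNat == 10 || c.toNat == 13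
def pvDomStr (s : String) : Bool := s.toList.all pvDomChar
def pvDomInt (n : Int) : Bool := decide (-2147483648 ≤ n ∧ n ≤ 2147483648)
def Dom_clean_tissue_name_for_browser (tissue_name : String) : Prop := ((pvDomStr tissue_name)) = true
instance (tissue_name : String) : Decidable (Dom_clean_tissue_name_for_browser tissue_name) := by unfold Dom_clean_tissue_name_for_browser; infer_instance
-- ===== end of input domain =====

-- B replaces A's stateful accumulator loop by a boundary-index formulation
-- (find cut positions, slice, lowercase pieces, join with '_') and applies the
-- fixups via split/join instead of str.replace; objective: alternative (same cost).


-- ===== PORT A =====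
-- one step of A's `for char in tissue_name` loop on the accumulator `formatted_name`
-- (`formatted_name[-1]` on a nonempty string ported as `acc.getLast?`)
def pvAStep (acc : List Char) (c : Char) : List Char :=
  if PySem.Chars.isupper c then
    (if 0 < acc.length ∧ acc.getLast? ≠ some '_' then acc ++ ['_'] else acc)
      ++ [PySem.Chars.lowerChar c]
  else
    acc ++ [c]

def pvAReplacements : PySem.Dict String String := PySem.Dict.mk
  [ ("basalganglia", "basal_ganglia")
  , ("nucleusaccumbens", "nucleus_accumbens")
  , ("spinalcord", "spinal_cord")
  , ("cervicalc", "cervical_c")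
  , ("substantianigra", "substantia_nigra")
  , ("culturedfibroblasts", "cultured_fibroblasts")
  , ("lowerleg", "lower_leg")
  , ("transformedlymphocytes", "transformed_lymphocytes")
  , ("anteriorcingulatecortex", "anterior_cingulate_cortex")
  , ("b_a24", "ba24")
  , ("b_a9", "ba9")
  , ("e_b_v", "ebv") ]

def clean_tissue_name_for_browser (tissue_name : String) : String :=
  let formatted_name := tissue_name.toList.foldl pvAStep []
  pvAReplacements.items.foldl
    (fun s p => PySem.Str.replace s p.1 p.2) (String.ofList formatted_name)

-- ===== PORT B =====
-- the same twelve (old, new) pairs, as B's literal list of pairs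
def pvBPairs : List (List Char × List Char) :=
  [ ("basalganglia".toList, "basal_ganglia".toList)
  , ("nucleusaccumbens".toList, "nucleus_accumbens".toList)
  , ("spinalcord".toList, "spinal_cord".toList)
  , ("cervicalc".toList, "cervical_c".toList)
  , ("substantianigra".toList, "substantia_nigra".toList)
  , ("culturedfibroblasts".toList, "cultured_fibroblasts".toList)
  , ("lowerleg".toList, "lower_leg".toList)
  , ("transformedlymphocytes".toList, "transformed_lymphocytes".toList)
  , ("anteriorcingulatecortex".toList, "anterior_cingulate_cortex".toList)
  , ("b_a24".toList, "ba24".toList)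
  , ("b_a9".toList, "ba9".toList)
  , ("e_b_v".toList, "ebv".toList) ]

def clean_tissue_name_for_browser_alt (tissue_name : String) : String :=
  let cs := tissue_name.toList
  -- cuts = [i for i, char in enumerate(s) if i > 0 and char.isupper() and s[i-1] != "_"]
  let cuts : List Int :=
    ((PySem.List.enumerate cs).filter (fun p =>
      decide (0 < p.1) && PySem.Chars.isupper p.2 &&
        (PySem.List.pyGetD cs (p.1 - 1) ' ' != '_'))).map Prod.fst
  let n : Int := cs.length
  -- pieces = [s[a:b].lower() for a, b in zip([0] + cuts, cuts + [len(s)])]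
  let pieces : List (List Char) :=
    ((0 :: cuts).zip (cuts ++ [n])).map
      (fun p => PySem.Chars.lower (PySem.Chars.slice cs (some p.1) (some p.2)))
  -- name = "_".join(pieces); then for old, new in pairs: name = new.join(name.split(old))
  let name := PySem.Chars.join ['_'] pieces
  String.ofList (pvBPairs.foldl
    (fun nm pr => PySem.Chars.join pr.2 (PySem.Chars.splitOn nm pr.1)) name)

-- ===== PRECONDITION & SPEC =====
def Spec_clean_tissue_name_for_browser (tissue_name : String) (out : String) : Prop := out = clean_tissue_name_for_browser_alt tissue_name
instance (tissue_name : String) (out : String) : Decidable (Spec_clean_tissue_name_for_browser tissue_name out) := by unfold Spec_clean_tissue_name_for_browser; infer_instance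

-- ===== CLAIM (what is proved, stated in full; the proofs are below) =====
def Claim_equal_clean_tissue_name_for_browser : Prop := ∀ (tissue_name : String), Dom_clean_tissue_name_for_browser tissue_name → Spec_clean_tissue_name_for_browser tissue_name (clean_tissue_name_for_browser tissue_name)

-- ===== LEMMAS AND PROOFS =====

-- ---- the common snake-case spec ----
def pvSnake (prev : Char) : List Char → List Char
  | [] => []
  | c :: t =>
    (if PySem.Chars.isupper c && prev != '_' then ['_'] else [])
      ++ PySem.Chars.lowerChar c :: pvSnake c t

lemma pvLowerChar_eq_underscore_iff (c : Char) :
    PySem.Chars.lowerChar c = '_' ↔ c = '_' := by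
  unfold PySem.Chars.lowerChar PySem.Chars.isupper
  split_ifs with h
  · simp only [Bool.and_eq_true, decide_eq_true_eq] at h
    have h1 : 65 ≤ c.toNat := by
      have := h.1; rw [Char.le_def] at this; exact UInt32.le_iff_toNat_le.mp this
    have h2 : c.toNat ≤ 90 := by
      have := h.2; rw [Char.le_def] at this; exact UInt32.le_iff_toNat_le.mp this
    constructor
    · intro he
      have ht := congrArg Char.toNat he
      rw [Char.toNat_ofNat] at ht
      have hv : (c.toNat + 32).isValidChar := Or.inl (by omega)
      rw [if_pos hv] at ht
      have : ('_' : Char).toNat = 95 := by decide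
      omega
    · intro he; subst he
      have : ('_' : Char).toNat = 95 := by decide
      omega
  · simp

lemma pvLowerChar_underscore : PySem.Chars.lowerChar '_' = '_' := by decide

-- ---- A's loop equals the snake-case spec ----
lemma pvStep_eq (acc : List Char) (c prev : Char)
    (h : (acc ≠ [] ∧ acc.getLast? ≠ some '_') ↔ prev ≠ '_') :
    pvAStep acc c =
      acc ++ ((if PySem.Chars.isupper c && prev != '_' then ['_'] else [])
        ++ [PySem.Chars.lowerChar c]) := by
  unfold pvAStep
  by_cases hu : PySem.Chars.isupper c = true
  · rw [if_pos hu]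
    by_cases hp : prev = '_'
    · have hA : ¬ (0 < acc.length ∧ acc.getLast? ≠ some '_') := by
        intro ⟨ha1, ha2⟩
        exact h.mp ⟨List.ne_nil_of_length_pos ha1, ha2⟩ hp
      rw [if_neg hA]
      simp [hu, hp]
    · have hA : 0 < acc.length ∧ acc.getLast? ≠ some '_' := by
        have := h.mpr hp
        exact ⟨List.length_pos_of_ne_nil this.1, this.2⟩
      rw [if_pos hA]
      simp [hu, hp]
  · rw [if_neg hu]
    simp only [Bool.not_eq_true] at hu
    simp [hu, PySem.Chars.lowerChar]

lemma pvStage (cs : List Char) : ∀ (acc : List Char) (prev : Char),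
    ((acc ≠ [] ∧ acc.getLast? ≠ some '_') ↔ prev ≠ '_') →
    cs.foldl pvAStep acc = acc ++ pvSnake prev cs := by
  induction cs with
  | nil => intro acc prev _; simp [pvSnake]
  | cons c rest ih =>
    intro acc prev h
    have hstep := pvStep_eq acc c prev h
    have hlast : (pvAStep acc c).getLast? = some (PySem.Chars.lowerChar c) := by
      rw [hstep]
      by_cases hb : (PySem.Chars.isupper c && prev != '_') = true <;> simp [hb]
    have hinv : ((pvAStep acc c ≠ [] ∧ (pvAStep acc c).getLast? ≠ some '_') ↔ c ≠ '_') := by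
      constructor
      · rintro ⟨-, h2⟩ hc
        exact h2 (by rw [hlast, hc, pvLowerChar_underscore])
      · intro hc
        refine ⟨?_, ?_⟩
        · rw [hstep]
          by_cases hb : (PySem.Chars.isupper c && prev != '_') = true <;> simp [hb]
        · rw [hlast]
          intro he
          exact hc ((pvLowerChar_eq_underscore_iff c).mp (Option.some.inj he))
    rw [List.foldl_cons, ih _ c hinv, hstep, pvSnake]
    simp [List.append_assoc]

-- ---- B's boundary/slice/join computation equals the snake-case spec ----
-- insert '_' before every position (counted from i) that lies in ks
def pvIns (ks : List Nat) (i : Nat) : List Char → List Char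
  | [] => []
  | c :: t => (if i ∈ ks then ['_'] else []) ++ c :: pvIns ks (i + 1) t

lemma pvIns_nil (i : Nat) (l : List Char) : pvIns [] i l = l := by
  induction l generalizing i with
  | nil => rfl
  | cons c t ih => simp [pvIns, ih]

lemma pvIns_congr (ks ks' : List Nat) (i : Nat) (l : List Char)
    (h : ∀ j, i ≤ j → (j ∈ ks ↔ j ∈ ks')) : pvIns ks i l = pvIns ks' i l := by
  induction l generalizing i with
  | nil => rfl
  | cons c t ih =>
    simp only [pvIns]
    rw [ih (i + 1) (fun j hj => h j (by omega))]
    by_cases hm : i ∈ ks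
    · rw [if_pos hm, if_pos ((h i le_rfl).mp hm)]
    · rw [if_neg hm, if_neg (fun hm' => hm ((h i le_rfl).mpr hm'))]

lemma pvIns_append (ks : List Nat) (i : Nat) (l₁ l₂ : List Char)
    (h : ∀ j, i ≤ j → j < i + l₁.length → j ∉ ks) :
    pvIns ks i (l₁ ++ l₂) = l₁ ++ pvIns ks (i + l₁.length) l₂ := by
  induction l₁ generalizing i with
  | nil => simp
  | cons c t ih =>
    simp only [List.cons_append, pvIns, List.length_cons]
    rw [if_neg (h i le_rfl (by simp)),
      ih (i + 1) (fun j hj1 hj2 => h j (by omega) (by simp; omega)),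
      show i + 1 + t.length = i + (t.length + 1) from by omega]
    simp

-- join of consecutive lowered slices with '_' separators = pvIns over the lowered suffix
lemma pvJoinSlices (cs : List Char) : ∀ (ks : List Nat) (a : Nat),
    ks.Pairwise (· < ·) → (∀ k ∈ ks, a < k ∧ k < cs.length) → a ≤ cs.length →
    PySem.Chars.join ['_']
      (((a :: ks).zip (ks ++ [cs.length])).map
        (fun p => PySem.Chars.lower ((cs.drop p.1).take (p.2 - p.1)))) =
      pvIns ks a (PySem.Chars.lower (cs.drop a)) := by
  intro ks
  induction ks with
  | nil =>
    intro a _ _ ha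
    simp only [List.nil_append, List.zip_cons_cons, List.zip_nil_left, List.map_cons,
      List.map_nil, PySem.Chars.join_singleton, pvIns_nil]
    rw [List.take_of_length_le (by rw [List.length_drop])]
  | cons k ks' ih =>
    intro a hpw hbd ha
    have hak : a < k := (hbd k (by simp)).1
    have hkn : k < cs.length := (hbd k (by simp)).2
    have hpw' : ks'.Pairwise (· < ·) := hpw.of_cons
    have hkk : ∀ k' ∈ ks', k < k' := fun k' hk' => List.rel_of_pairwise_cons hpw hk'
    have hbd' : ∀ k' ∈ ks', k < k' ∧ k' < cs.length :=
      fun k' hk' => ⟨hkk k' hk', (hbd k' (by simp [hk'])).2⟩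
    -- the tail of the zip is nonempty
    obtain ⟨q, qs, hz⟩ : ∃ q qs,
        (((k :: ks').zip (ks' ++ [cs.length])).map
          (fun p => PySem.Chars.lower ((cs.drop p.1).take (p.2 - p.1)))) = q :: qs := by
      cases ks' <;> simp
    have hjoin := ih k hpw' hbd' (le_of_lt hkn)
    -- decompose the suffix at k
    obtain ⟨c, rest, hck⟩ : ∃ c rest, cs.drop k = c :: rest := by
      cases h : cs.drop k with
      | nil =>
        exfalso
        have := congrArg List.length h
        simp at this
        omega
      | cons c rest => exact ⟨c, rest, rfl⟩
    have hknotmem : k ∉ ks' := fun h => absurd (hkk k h) (lt_irrefl k)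
    have hlen : ((cs.drop a).take (k - a)).length = k - a := by
      simp
      omega
    have hsplit : cs.drop a = (cs.drop a).take (k - a) ++ cs.drop k := by
      conv_lhs => rw [← List.take_append_drop (k - a) (cs.drop a)]
      rw [List.drop_drop, Nat.add_sub_cancel' (le_of_lt hak)]
    -- RHS rewriting
    have htail : pvIns (k :: ks') k (PySem.Chars.lower (cs.drop k)) =
        '_' :: pvIns ks' k (PySem.Chars.lower (cs.drop k)) := by
      rw [hck]
      simp only [PySem.Chars.lower, List.map_cons, pvIns,
        if_pos (List.mem_cons_self), if_neg hknotmem]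
      rw [pvIns_congr (k :: ks') ks' (k + 1) _ (by
        intro j hj
        simp only [List.mem_cons]
        constructor
        · rintro (rfl | hm)
          · omega
          · exact hm
        · intro hm
          exact Or.inr hm)]
      simp
    have hrhs : pvIns (k :: ks') a (PySem.Chars.lower (cs.drop a)) =
        PySem.Chars.lower ((cs.drop a).take (k - a)) ++ '_' ::
          pvIns ks' k (PySem.Chars.lower (cs.drop k)) := by
      conv_lhs => rw [hsplit]
      simp only [PySem.Chars.lower, List.map_append]
      rw [pvIns_append _ _ _ _ (by
        intro j hj1 hj2 hjmem
        rw [List.length_map, hlen] at hj2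
        rcases List.mem_cons.mp hjmem with rfl | h
        · omega
        · have := hkk j h
          omega)]
      rw [List.length_map, hlen, show a + (k - a) = k from by omega]
      have := htail
      simp only [PySem.Chars.lower] at this
      rw [this]
    rw [hrhs, ← hjoin]
    -- LHS rewriting
    simp only [List.cons_append, List.zip_cons_cons, List.map_cons]
    rw [hz, PySem.Chars.join_cons_cons, ← hz]
    simp [List.append_assoc]

-- the cut positions, at the Nat level
def pvCutsN (cs : List Char) : List Nat :=
  (cs.zipIdx.filter (fun p =>
    decide (0 < p.2) && PySem.Chars.isupper p.1 && (cs.getD (p.2 - 1) ' ' != '_'))).map Prod.snd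

lemma pvCutsN_mem (cs : List Char) (j : Nat) :
    j ∈ pvCutsN cs ↔ 0 < j ∧ ∃ h : j < cs.length,
      (PySem.Chars.isupper cs[j] && (cs.getD (j - 1) ' ' != '_')) = true := by
  simp only [pvCutsN, List.mem_map, List.mem_filter]
  constructor
  · rintro ⟨⟨c, i⟩, ⟨hmem, hp⟩, rfl⟩
    have hg := List.mk_mem_zipIdx_iff_getElem?.mp hmem
    have hlt : i < cs.length := by
      by_contra hge
      rw [List.getElem?_eq_none (by omega)] at hg
      simp at hg
    have hc : cs[i] = c := by
      rw [List.getElem?_eq_getElem hlt] at hg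
      exact Option.some.inj hg
    simp only [Bool.and_eq_true, decide_eq_true_eq] at hp
    refine ⟨hp.1.1, hlt, ?_⟩
    simp only [Bool.and_eq_true]
    exact ⟨by rw [hc]; exact hp.1.2, hp.2⟩
  · rintro ⟨h0, hlt, hb⟩
    rw [Bool.and_eq_true] at hb
    refine ⟨(cs[j], j), ⟨List.mk_mem_zipIdx_iff_getElem?.mpr
      (List.getElem?_eq_getElem hlt), ?_⟩, rfl⟩
    simp only [Bool.and_eq_true, decide_eq_true_eq]
    exact ⟨⟨h0, hb.1⟩, hb.2⟩

lemma pvCutsN_sorted (cs : List Char) : (pvCutsN cs).Pairwise (· < ·) := by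
  have hz : cs.zipIdx.Pairwise (fun p q => p.2 < q.2) := by
    have := List.zipIdx_map_snd 0 cs
    have hr : (List.map Prod.snd cs.zipIdx).Pairwise (· < ·) := by
      rw [this]
      exact List.pairwise_lt_range' 1
    exact (List.pairwise_map).mp hr
  exact (List.pairwise_map).mpr (hz.sublist List.filter_sublist)

-- pvIns at the cut positions = the snake-case spec
lemma pvInsCuts (cs : List Char) : ∀ (t : List Char) (i : Nat) (prev : Char),
    cs.drop i = t → (i = 0 → prev = '_') → (∀ _ : 0 < i, prev = cs.getD (i - 1) ' ') →
    pvIns (pvCutsN cs) i (PySem.Chars.lower t) = pvSnake prev t := by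
  intro t
  induction t with
  | nil => intro i prev _ _ _; rfl
  | cons c t' ih =>
    intro i prev hdrop h0 hpos
    have hlt : i < cs.length := by
      have := congrArg List.length hdrop
      simp at this
      omega
    have hcons : cs[i] :: cs.drop (i + 1) = c :: t' := by
      rw [List.getElem_cons_drop hlt]
      exact hdrop
    have hc : cs[i] = c := (List.cons_eq_cons.mp hcons).1
    have ht' : cs.drop (i + 1) = t' := (List.cons_eq_cons.mp hcons).2
    have hiff : (i ∈ pvCutsN cs) ↔ (PySem.Chars.isupper c && prev != '_') = true := by
      rw [pvCutsN_mem]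
      rcases Nat.eq_zero_or_pos i with rfl | hip
      · rw [h0 rfl]
        simp
      · rw [hpos hip]
        constructor
        · rintro ⟨-, h2, hb⟩
          rw [hc] at hb
          exact hb
        · intro hb
          exact ⟨hip, hlt, by rw [hc]; exact hb⟩
    simp only [PySem.Chars.lower, List.map_cons, pvIns, pvSnake]
    have hrec : pvIns (pvCutsN cs) (i + 1) (List.map PySem.Chars.lowerChar t') =
        pvSnake c t' := by
      have := ih (i + 1) c ht' (by omega) (fun _ => by
        have hgd : cs.getD (i + 1 - 1) ' ' = cs[i] := by
          simp only [Nat.add_sub_cancel]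
          rw [List.getD_eq_getElem?_getD, List.getElem?_eq_getElem hlt]
          rfl
        rw [hgd, hc])
      simpa [PySem.Chars.lower] using this
    by_cases hb : (PySem.Chars.isupper c && prev != '_') = true
    · rw [if_pos (hiff.mpr hb), if_pos hb, hrec]
    · rw [if_neg (fun hm => hb (hiff.mp hm)), if_neg hb, hrec]

-- the Int-level cuts of the port are the Nat-level cuts
lemma pvCuts_eq (cs : List Char) :
    ((PySem.List.enumerate cs).filter (fun p =>
      decide (0 < p.1) && PySem.Chars.isupper p.2 &&
        (PySem.List.pyGetD cs (p.1 - 1) ' ' != '_'))).map Prod.fst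
    = (pvCutsN cs).map (Nat.cast : Nat → Int) := by
  rw [PySem.List.enumerate_eq_zipIdx_map cs 0]
  simp only [zero_add, pvCutsN, List.filter_map, List.map_map]
  congr 1
  apply List.filter_congr
  rintro ⟨c, i⟩ -
  simp only [Function.comp_apply]
  rcases Nat.eq_zero_or_pos i with rfl | hip
  · simp
  · have h1 : ((i : Int) - 1) = ((i - 1 : Nat) : Int) := by omega
    rw [h1, PySem.List.pyGetD_natCast]
    simp [hip]

-- ---- split/join equals replace ----
def pvRepl (o : Char) (os new : List Char) : List Char → List Char
  | [] => []
  | c :: t =>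
    if (o :: os).isPrefixOf (c :: t) then new ++ pvRepl o os new (t.drop os.length)
    else c :: pvRepl o os new t
termination_by l => l.length
decreasing_by all_goals (simp; try omega)

def pvSplit (o : Char) (os cur : List Char) : List Char → List (List Char)
  | [] => [cur]
  | c :: t =>
    if (o :: os).isPrefixOf (c :: t) then cur :: pvSplit o os [] (t.drop os.length)
    else pvSplit o os (cur ++ [c]) t
termination_by l => l.length
decreasing_by all_goals (simp; try omega)

lemma pvReplace_go (o : Char) (os new : List Char) :
    ∀ (fuel : Nat) (l acc : List Char), l.length ≤ fuel →
    PySem.Chars.replace.go (o :: os) new fuel l acc = acc.reverse ++ pvRepl o os new l := by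
  intro fuel
  induction fuel with
  | zero =>
    intro l acc hl
    have : l = [] := List.eq_nil_of_length_eq_zero (by omega)
    subst this
    rw [PySem.Chars.replace.go.eq_def]
    simp [pvRepl]
  | succ fuel ih =>
    intro l acc hl
    cases l with
    | nil =>
      rw [PySem.Chars.replace.go.eq_def]
      simp [pvRepl]
    | cons c t =>
      rw [PySem.Chars.replace.go.eq_def]
      simp only []
      by_cases hp : (o :: os).isPrefixOf (c :: t) = true
      · rw [if_pos hp]
        have hd : (List.drop (o :: os).length (c :: t)) = t.drop os.length := by simp
        rw [hd, ih _ _ (by simp at hl ⊢; omega)]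
        simp only [pvRepl, if_pos hp, List.reverse_append]
        simp
      · rw [if_neg hp]
        rw [ih _ _ (by simp at hl ⊢; omega)]
        simp only [pvRepl, if_neg hp]
        simp

lemma pvSplit_go (o : Char) (os : List Char) :
    ∀ (fuel : Nat) (l cur : List Char) (acc : List (List Char)), l.length ≤ fuel →
    PySem.Chars.splitOn.go (o :: os) fuel l cur acc = acc.reverse ++ pvSplit o os cur.reverse l := by
  intro fuel
  induction fuel with
  | zero =>
    intro l cur acc hl
    have : l = [] := List.eq_nil_of_length_eq_zero (by omega)
    subst this
    rw [PySem.Chars.splitOn.go.eq_def]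
    simp [pvSplit]
  | succ fuel ih =>
    intro l cur acc hl
    cases l with
    | nil =>
      rw [PySem.Chars.splitOn.go.eq_def]
      simp [pvSplit]
    | cons c t =>
      rw [PySem.Chars.splitOn.go.eq_def]
      simp only []
      by_cases hp : (o :: os).isPrefixOf (c :: t) = true
      · rw [if_pos hp]
        have hd : (List.drop (o :: os).length (c :: t)) = t.drop os.length := by simp
        rw [hd, ih _ _ _ (by simp at hl ⊢; omega)]
        simp only [pvSplit, if_pos hp]
        simp
      · rw [if_neg hp]
        rw [ih _ _ _ (by simp at hl ⊢; omega)]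
        simp only [pvSplit, if_neg hp]
        simp

lemma pvSplit_ne_nil (o : Char) (os cur l : List Char) : pvSplit o os cur l ≠ [] := by
  induction hn : l.length using Nat.strong_induction_on generalizing cur l with
  | _ n ih =>
    cases l with
    | nil => simp [pvSplit]
    | cons c t =>
      simp only [pvSplit]
      by_cases hp : (o :: os).isPrefixOf (c :: t) = true
      · rw [if_pos hp]; simp
      · rw [if_neg hp]
        exact ih t.length (by simp [← hn]) _ t rfl

lemma pvJoinSplit (o : Char) (os new : List Char) :
    ∀ (l cur : List Char),
    PySem.Chars.join new (pvSplit o os cur l) = cur ++ pvRepl o os new l := by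
  intro l
  induction hn : l.length using Nat.strong_induction_on generalizing l with
  | _ n ih =>
    intro cur
    cases l with
    | nil => simp [pvSplit, pvRepl, PySem.Chars.join_singleton]
    | cons c t =>
      simp only [pvSplit, pvRepl]
      by_cases hp : (o :: os).isPrefixOf (c :: t) = true
      · rw [if_pos hp, if_pos hp]
        obtain ⟨q, qs, hq⟩ : ∃ q qs, pvSplit o os [] (t.drop os.length) = q :: qs := by
          cases h : pvSplit o os [] (t.drop os.length) with
          | nil => exact absurd h (pvSplit_ne_nil o os _ _)
          | cons q qs => exact ⟨q, qs, rfl⟩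
        rw [hq, PySem.Chars.join_cons_cons, ← hq,
          ih (t.drop os.length).length (by simp [← hn]) _ rfl []]
        simp
      · rw [if_neg hp, if_neg hp,
          ih t.length (by simp [← hn]) t rfl (cur ++ [c])]
        simp

lemma pvReplace_eq_join_splitOn (o : Char) (os new s : List Char) :
    PySem.Chars.join new (PySem.Chars.splitOn s (o :: os)) =
      PySem.Chars.replace s (o :: os) new := by
  unfold PySem.Chars.splitOn PySem.Chars.replace
  rw [if_neg (by simp)]
  rw [pvSplit_go o os (s.length + 1) s [] [] (by omega),
    pvReplace_go o os new s.length s [] le_rfl]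
  simp only [List.reverse_nil, List.nil_append]
  exact pvJoinSplit o os new s []

-- B's whole boundary/slice/join computation equals the snake-case spec
lemma pvBsnake (cs : List Char) :
    PySem.Chars.join ['_']
      (((0 :: ((PySem.List.enumerate cs).filter (fun p =>
          decide (0 < p.1) && PySem.Chars.isupper p.2 &&
            (PySem.List.pyGetD cs (p.1 - 1) ' ' != '_'))).map Prod.fst).zip
        (((PySem.List.enumerate cs).filter (fun p =>
          decide (0 < p.1) && PySem.Chars.isupper p.2 &&
            (PySem.List.pyGetD cs (p.1 - 1) ' ' != '_'))).map Prod.fst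
          ++ [(cs.length : Int)])).map
        (fun p => PySem.Chars.lower (PySem.Chars.slice cs (some p.1) (some p.2)))) =
      pvSnake '_' cs := by
  rw [pvCuts_eq]
  have h0 : (0 : Int) = ((0 : Nat) : Int) := rfl
  have hn : [(cs.length : Int)] = List.map (Nat.cast : Nat → Int) [cs.length] := rfl
  rw [h0, hn, ← List.map_cons, ← List.map_append, List.zip_map, List.map_map]
  have hfun : ((fun p => PySem.Chars.lower (PySem.Chars.slice cs (some p.1) (some p.2)))
        ∘ Prod.map (Nat.cast : Nat → Int) (Nat.cast : Nat → Int)) =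
      (fun p : Nat × Nat => PySem.Chars.lower ((cs.drop p.1).take (p.2 - p.1))) := by
    funext p
    cases p with
    | mk a b =>
      simp only [Function.comp_apply, Prod.map, PySem.Chars.slice,
        PySem.List.slice_natCast]
  rw [hfun, pvJoinSlices cs (pvCutsN cs) 0 (pvCutsN_sorted cs)
    (fun k hk => by
      obtain ⟨h1, h2, -⟩ := (pvCutsN_mem cs k).mp hk
      exact ⟨h1, h2⟩)
    (Nat.zero_le _)]
  rw [List.drop_zero]
  exact pvInsCuts cs cs 0 '_' List.drop_zero (fun _ => rfl)
    (fun hzero => absurd hzero (by omega))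

-- applying the fixups by split/join equals applying them by replace
lemma pvFixups : ∀ (ps : List (String × String)) (nm : List Char),
    (∀ p ∈ ps, p.1.toList ≠ []) →
    ps.foldl (fun s p => PySem.Str.replace s p.1 p.2) (String.ofList nm) =
    String.ofList ((ps.map (fun p => (p.1.toList, p.2.toList))).foldl
      (fun nm pr => PySem.Chars.join pr.2 (PySem.Chars.splitOn nm pr.1)) nm) := by
  intro ps
  induction ps with
  | nil => intro nm _; rfl
  | cons p ps' ih =>
    intro nm hne
    simp only [List.foldl_cons, List.map_cons]
    have hstep : PySem.Str.replace (String.ofList nm) p.1 p.2 =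
        String.ofList (PySem.Chars.join p.2.toList (PySem.Chars.splitOn nm p.1.toList)) := by
      obtain ⟨o, os, ho⟩ : ∃ o os, p.1.toList = o :: os := by
        cases h : p.1.toList with
        | nil => exact absurd h (hne p (by simp))
        | cons o os => exact ⟨o, os, rfl⟩
      apply String.toList_injective
      rw [PySem.Str.toList_replace, String.toList_ofList, String.toList_ofList, ho,
        pvReplace_eq_join_splitOn]
    rw [hstep, ih _ (fun q hq => hne q (by simp [hq]))]

-- ===== VERDICT (by name: the statement is the Claim_ definition above) =====
theorem clean_tissue_name_for_browser_spec : Claim_equal_clean_tissue_name_for_browser := by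
  intro s _
  unfold Spec_clean_tissue_name_for_browser clean_tissue_name_for_browser
    clean_tissue_name_for_browser_alt
  simp only []
  rw [pvBsnake s.toList, pvStage s.toList [] '_' (by simp), List.nil_append]
  have hpairs : pvBPairs = pvAReplacements.items.map (fun p => (p.1.toList, p.2.toList)) := by
    decide
  rw [hpairs]
  exact pvFixups pvAReplacements.items (pvSnake '_' s.toList) (by decide)
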